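-- pv_equiv track=rewrite | github.com/Darkdiamond10/Bugs | secret_net.py | extract_payment_urls
-- ===== SOURCE A (Python) =====
-- def extract_payment_urls(urls):
--     payment_keys = ['pay', 'payment', 'checkout', 'billing']
--     payments = set()
--     for url in urls:
--         for key in payment_keys:
--             if key in url.lower():
--                 payments.add(url)
--     return payments
-- ===== SOURCE B (Python) =====
-- # Single character-level scan per URL (one pass checking keyword prefixes at each
-- # position) instead of one substring search per keyword; result built as a set
-- # comprehension over one pass of urls.  'payment' is dropped as redundant: any
-- # url containing 'payment' contains 'pay'.
--
-- def _has_payment_key(low):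
--     n = len(low)
--     for i in range(n):
--         c = low[i]
--         if c == 'p':
--             if low[i:i+3] == 'pay':
--                 return True
--         elif c == 'c':
--             if low[i:i+8] == 'checkout':
--                 return True
--         elif c == 'b':
--             if low[i:i+7] == 'billing':
--                 return True
--     return False
--
-- def extract_payment_urls(urls):
--     return {u for u in urls if _has_payment_key(u.lower())}
-- ===== Notes on version B (the rewrite author's own statement) =====
-- stated objective: alternative
-- what changed: B replaces A's per-keyword inner loop of substring searches (with the redundant 'payment' key) by a single left-to-right scan of each lowercased url that checks at every position whether one of the three distinct-first-letter keywords starts there, and builds the result set in one comprehension pass.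
import Mathlib
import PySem

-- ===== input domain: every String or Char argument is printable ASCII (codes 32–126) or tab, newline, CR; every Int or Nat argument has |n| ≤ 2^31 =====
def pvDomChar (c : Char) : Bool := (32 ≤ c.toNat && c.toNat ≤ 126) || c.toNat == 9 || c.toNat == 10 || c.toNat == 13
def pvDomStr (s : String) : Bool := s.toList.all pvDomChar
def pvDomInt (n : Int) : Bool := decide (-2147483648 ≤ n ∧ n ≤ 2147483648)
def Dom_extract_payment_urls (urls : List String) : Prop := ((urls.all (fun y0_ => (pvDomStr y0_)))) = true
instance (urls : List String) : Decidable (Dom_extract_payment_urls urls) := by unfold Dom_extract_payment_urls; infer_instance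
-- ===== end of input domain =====

-- B replaces A's per-keyword substring searches (and the redundant 'payment' key) by a
-- single left-to-right scan of each lowercased url; equal return value is proved for all inputs.
-- ===== PORT A =====
def extract_payment_urls (urls : List String) : List String :=
  urls.foldl (fun payments url =>
    (["pay", "payment", "checkout", "billing"]).foldl
      (fun s key => if PySem.Str.isIn key (PySem.Str.lower url) then PySem.Set.add s url else s)
      payments) []

-- ===== PORT B =====
-- one pass over the lowercased url: at each position check whether one of the
-- three keywords (distinct first letters) starts there
def hasPaymentKey (low : List Char) : Bool :=
  (PySem.List.pyRange 0 low.length 1).any (fun i =>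
    if PySem.List.pyGetD low i ' ' = 'p' then
      PySem.List.slice low (some i) (some (i + 3)) == "pay".toList
    else if PySem.List.pyGetD low i ' ' = 'c' then
      PySem.List.slice low (some i) (some (i + 8)) == "checkout".toList
    else if PySem.List.pyGetD low i ' ' = 'b' then
      PySem.List.slice low (some i) (some (i + 7)) == "billing".toList
    else false)

def extract_payment_urls_alt (urls : List String) : List String :=
  PySem.Set.ofList (urls.filter (fun u => hasPaymentKey (PySem.Str.lower u).toList))

-- ===== PRECONDITION & SPEC =====
def Spec_extract_payment_urls (urls : List String) (out : List String) : Prop := out = extract_payment_urls_alt urls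
instance (urls : List String) (out : List String) : Decidable (Spec_extract_payment_urls urls out) := by unfold Spec_extract_payment_urls; infer_instance

-- ===== CLAIM (what is proved, stated in full; the proofs are below) =====
def Claim_equal_extract_payment_urls : Prop := ∀ (urls : List String), Dom_extract_payment_urls urls → Spec_extract_payment_urls urls (extract_payment_urls urls)

-- ===== LEMMAS AND PROOFS =====

-- a keyword matches as a slice at some valid position iff it is a substring
lemma scan_pos_iff_isIn (low key : List Char) (hk : key ≠ []) :
    (∃ i : Int, 0 ≤ i ∧ i < (low.length : Int) ∧
      PySem.List.slice low (some i) (some (i + key.length)) = key)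
    ↔ PySem.Chars.isIn key low = true := by
  rw [← PySem.Chars.exists_prefix_drop_iff_isIn]
  constructor
  · rintro ⟨i, h0, hlt, hsl⟩
    obtain ⟨n, rfl⟩ : ∃ n : Nat, i = (n : Int) := ⟨i.toNat, by omega⟩
    refine ⟨n, ?_⟩
    rw [show (n : Int) + (key.length : Int) = ((n + key.length : Nat) : Int) by push_cast; ring,
      PySem.List.slice_natCast] at hsl
    rw [show n + key.length - n = key.length by omega] at hsl
    exact List.prefix_iff_eq_take.2 hsl.symm
  · rintro ⟨j, hpre⟩
    have hjlt : j < low.length := by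
      by_contra hge
      have hnil : low.drop j = [] := List.drop_eq_nil_of_le (by omega)
      rw [hnil, List.prefix_nil] at hpre
      exact hk hpre
    refine ⟨(j : Int), by omega, by exact_mod_cast hjlt, ?_⟩
    rw [show (j : Int) + (key.length : Int) = ((j + key.length : Nat) : Int) by push_cast; ring,
      PySem.List.slice_natCast]
    rw [show j + key.length - j = key.length by omega]
    rw [List.prefix_iff_eq_take] at hpre
    exact hpre.symm

-- the first character of a keyword found at position j is what the scanner's guard reads
lemma getElem?_of_prefix_drop (low : List Char) (c : Char) (t : List Char) (j : Nat)
    (hpre : (c :: t) <+: low.drop j) : low[j]? = some c := by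
  obtain ⟨r, hr⟩ := hpre
  have h0 : (low.drop j)[0]? = some c := by rw [← hr]; rfl
  rw [List.getElem?_drop] at h0
  simpa using h0

-- B's one-pass scanner accepts exactly the strings containing one of the three keywords
lemma hasPaymentKey_eq (low : List Char) :
    hasPaymentKey low =
      (PySem.Chars.isIn "pay".toList low || PySem.Chars.isIn "checkout".toList low
        || PySem.Chars.isIn "billing".toList low) := by
  rw [Bool.eq_iff_iff, Bool.or_eq_true, Bool.or_eq_true]
  rw [hasPaymentKey, List.any_eq_true]
  constructor
  · rintro ⟨i, hmem, hcond⟩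
    rw [PySem.List.mem_pyRange_one] at hmem
    obtain ⟨h0, hlt⟩ := hmem
    by_cases hp : PySem.List.pyGetD low i ' ' = 'p'
    · rw [if_pos hp, beq_iff_eq] at hcond
      exact Or.inl (Or.inl ((scan_pos_iff_isIn low "pay".toList (by decide)).1
        ⟨i, h0, hlt, by exact_mod_cast hcond⟩))
    by_cases hc : PySem.List.pyGetD low i ' ' = 'c'
    · rw [if_neg hp, if_pos hc, beq_iff_eq] at hcond
      exact Or.inl (Or.inr ((scan_pos_iff_isIn low "checkout".toList (by decide)).1
        ⟨i, h0, hlt, by exact_mod_cast hcond⟩))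
    by_cases hb : PySem.List.pyGetD low i ' ' = 'b'
    · rw [if_neg hp, if_neg hc, if_pos hb, beq_iff_eq] at hcond
      exact Or.inr ((scan_pos_iff_isIn low "billing".toList (by decide)).1
        ⟨i, h0, hlt, by exact_mod_cast hcond⟩)
    · rw [if_neg hp, if_neg hc, if_neg hb] at hcond
      exact absurd hcond (by simp)
  · intro h
    have key_case : ∀ (c : Char) (t : List Char),
        PySem.Chars.isIn (c :: t) low = true →
        ∃ i : Int, (0 ≤ i ∧ i < (low.length : Int)) ∧ PySem.List.pyGetD low i ' ' = c ∧
          PySem.List.slice low (some i) (some (i + (c :: t).length)) = (c :: t) := by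
      intro c t hin
      obtain ⟨i, h0, hlt, hsl⟩ := (scan_pos_iff_isIn low (c :: t) (by simp)).2 hin
      refine ⟨i, ⟨h0, hlt⟩, ?_, hsl⟩
      obtain ⟨n, rfl⟩ : ∃ n : Nat, i = (n : Int) := ⟨i.toNat, by omega⟩
      rw [show (n : Int) + ((c :: t).length : Int) = ((n + (c :: t).length : Nat) : Int) by push_cast; ring,
        PySem.List.slice_natCast] at hsl
      have hpre : (c :: t) <+: low.drop n := by
        rw [show n + (c :: t).length - n = (c :: t).length by omega] at hsl
        exact List.prefix_iff_eq_take.2 hsl.symm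
      have hget := getElem?_of_prefix_drop low c t n hpre
      have hnlt : n < low.length := by exact_mod_cast hlt
      rw [PySem.List.pyGetD_natCast, List.getD_eq_getElem?_getD, hget]
      rfl
    rcases h with (hin | hin) | hin
    · obtain ⟨i, ⟨h0, hlt⟩, hget, hsl⟩ := key_case 'p' "ay".toList hin
      exact ⟨i, PySem.List.mem_pyRange_one.2 ⟨h0, hlt⟩, by rw [if_pos hget]; simpa using hsl⟩
    · obtain ⟨i, ⟨h0, hlt⟩, hget, hsl⟩ := key_case 'c' "heckout".toList hin
      refine ⟨i, PySem.List.mem_pyRange_one.2 ⟨h0, hlt⟩, ?_⟩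
      rw [if_neg (by rw [hget]; decide), if_pos hget]
      simpa using hsl
    · obtain ⟨i, ⟨h0, hlt⟩, hget, hsl⟩ := key_case 'b' "illing".toList hin
      refine ⟨i, PySem.List.mem_pyRange_one.2 ⟨h0, hlt⟩, ?_⟩
      rw [if_neg (by rw [hget]; decide), if_neg (by rw [hget]; decide), if_pos hget]
      simpa using hsl

-- 'payment' in l implies 'pay' in l
lemma payment_imp_pay (l : List Char)
    (h : PySem.Chars.isIn ['p', 'a', 'y', 'm', 'e', 'n', 't'] l = true) :
    PySem.Chars.isIn ['p', 'a', 'y'] l = true := by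
  rw [PySem.Chars.isIn_iff_infix] at *
  exact List.IsInfix.trans (List.IsPrefix.isInfix ⟨['m', 'e', 'n', 't'], rfl⟩) h

-- A's inner 4-key loop over one url acts as a single conditional insertion
lemma inner_fold (s : List String) (url : String) :
    (["pay", "payment", "checkout", "billing"]).foldl
      (fun s key => if PySem.Str.isIn key (PySem.Str.lower url) then PySem.Set.add s url else s) s
    = if hasPaymentKey (PySem.Str.lower url).toList then PySem.Set.add s url else s := by
  simp only [List.foldl, hasPaymentKey_eq, PySem.Str.isIn_eq, PySem.Str.toList_lower]
  by_cases h2 : PySem.Chars.isIn "payment".toList (PySem.Chars.lower url.toList) = true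
  · have h1 := payment_imp_pay _ (by simpa using h2)
    by_cases h3 : PySem.Chars.isIn "checkout".toList (PySem.Chars.lower url.toList) = true <;>
      by_cases h4 : PySem.Chars.isIn "billing".toList (PySem.Chars.lower url.toList) = true <;>
        simp_all
  · by_cases h1 : PySem.Chars.isIn "pay".toList (PySem.Chars.lower url.toList) = true <;>
      by_cases h3 : PySem.Chars.isIn "checkout".toList (PySem.Chars.lower url.toList) = true <;>
        by_cases h4 : PySem.Chars.isIn "billing".toList (PySem.Chars.lower url.toList) = true <;>
          simp_all

-- ===== VERDICT (by name: the statement is the Claim_ definition above) =====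
theorem extract_payment_urls_spec : Claim_equal_extract_payment_urls := by
  intro urls _
  unfold Spec_extract_payment_urls extract_payment_urls extract_payment_urls_alt
  rw [PySem.List.foldl_congr_mem urls _
        (fun s u => if hasPaymentKey (PySem.Str.lower u).toList then PySem.Set.add s u else s)
        [] (fun acc x _ => inner_fold acc x)]
  rw [PySem.List.foldl_if_eq_foldl_filter
      (p := fun u => hasPaymentKey (PySem.Str.lower u).toList) (f := PySem.Set.add)]
  rw [← PySem.Set.ofList_eq_foldl]
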